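-- pv_equiv track=rewrite | github.com/msfurr/BreathDetection | Coral_Test_4.py | movingAvg
-- ===== SOURCE A (Python) =====
-- def movingAvg(Class, windowSize):
--
--     filteredClass = []
--
--     for i in range(0, len(Class)):
--
--         if i < windowSize - 1:
--
--             filteredClass.append(Class[i])
--
--         elif Class[i] != Class[i - 1]:
--
--             if sum(Class[i - (windowSize - 1):(i + 1)]) / windowSize > 1:
--
--                 filteredClass.append(2)
--
--             elif sum(Class[i - (windowSize - 1):(i + 1)]) / windowSize < 1:
--
--                 filteredClass.append(0)
--
--             else:
--
--                 filteredClass.append(Class[i])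
--
--         elif Class[i] == Class[i - 1]:
--
--             filteredClass.append(Class[i])
--
--     return filteredClass
-- ===== SOURCE B (Python) =====
-- def movingAvg(Class, windowSize):
--     filteredClass = []
--     windowSum = 0
--     for i, c in enumerate(Class):
--         windowSum += c
--         if i >= windowSize:
--             windowSum -= Class[i - windowSize]
--         if i < windowSize - 1 or c == Class[i - 1]:
--             filteredClass.append(c)
--         elif windowSum > windowSize:
--             filteredClass.append(2)
--         elif windowSum < windowSize:
--             filteredClass.append(0)
--         else:
--             filteredClass.append(c)
--     return filteredClass
-- ===== Notes on version B (the rewrite author's own statement) =====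
-- stated objective: faster
-- what changed: B maintains the window sum incrementally in one pass (add the entering element, subtract the leaving one) instead of re-summing the w-element slice at every change point, and merges A's two append-Class[i] branches into one condition.
-- outside the precondition, e.g. on movingAvg([2, 0], -1): A returns [0, 0], B raises IndexError; on movingAvg([1, 0], 0): A raises ZeroDivisionError, B returns [1, 0]
import Mathlib
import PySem

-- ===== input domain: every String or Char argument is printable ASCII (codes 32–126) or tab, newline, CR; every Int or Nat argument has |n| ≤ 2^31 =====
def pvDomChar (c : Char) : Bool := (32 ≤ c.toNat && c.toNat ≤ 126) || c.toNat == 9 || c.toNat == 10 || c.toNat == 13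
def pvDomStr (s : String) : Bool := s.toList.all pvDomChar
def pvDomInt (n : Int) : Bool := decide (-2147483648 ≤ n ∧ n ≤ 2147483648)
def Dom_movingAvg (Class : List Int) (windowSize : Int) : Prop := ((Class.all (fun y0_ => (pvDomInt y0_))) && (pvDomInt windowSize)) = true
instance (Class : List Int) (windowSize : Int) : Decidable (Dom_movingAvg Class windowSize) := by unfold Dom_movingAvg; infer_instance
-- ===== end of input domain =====

-- B replaces A's per-change-point slice re-summation by one incrementally maintained running
-- window sum (sliding window): objective = faster.
-- Python's float comparison `sum(...)/windowSize > 1` is ported as the integer comparison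
-- `s > windowSize`, which is exact for windowSize ≥ 1 (guaranteed by Pre_) and |values| ≤ 2^31 (Dom).

-- ===== PORT A =====
def movingAvg (Class : List Int) (windowSize : Int) : List Int :=
  (PySem.List.pyRange 0 (Class.length : Int) 1).foldl (fun filteredClass i =>
    if i < windowSize - 1 then
      filteredClass ++ [PySem.List.pyGetD Class i 0]
    else if PySem.List.pyGetD Class i 0 ≠ PySem.List.pyGetD Class (i - 1) 0 then
      -- sum(Class[...]) / windowSize > 1 (resp. < 1) as exact integer comparisons, honouring the
      -- divisor's sign (windowSize = 0 raises in Python and is outside Pre_)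
      if (0 < windowSize ∧ (PySem.List.slice Class (some (i - (windowSize - 1))) (some (i + 1))).sum > windowSize)
          ∨ (windowSize < 0 ∧ (PySem.List.slice Class (some (i - (windowSize - 1))) (some (i + 1))).sum < windowSize) then
        filteredClass ++ [2]
      else if (0 < windowSize ∧ (PySem.List.slice Class (some (i - (windowSize - 1))) (some (i + 1))).sum < windowSize)
          ∨ (windowSize < 0 ∧ (PySem.List.slice Class (some (i - (windowSize - 1))) (some (i + 1))).sum > windowSize) then
        filteredClass ++ [0]
      else
        filteredClass ++ [PySem.List.pyGetD Class i 0]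
    else -- elif Class[i] == Class[i-1]: always true here
      filteredClass ++ [PySem.List.pyGetD Class i 0]) []

-- ===== PORT B =====
def movingAvg_alt (Class : List Int) (windowSize : Int) : List Int :=
  ((PySem.List.enumerate Class 0).foldl (fun (st : List Int × Int) p =>
      let i := p.1
      let c := p.2
      let ws0 := st.2 + c
      let ws := if windowSize ≤ i then ws0 - PySem.List.pyGetD Class (i - windowSize) 0 else ws0
      if i < windowSize - 1 ∨ c = PySem.List.pyGetD Class (i - 1) 0 then
        (st.1 ++ [c], ws)
      else if windowSize < ws then
        (st.1 ++ [2], ws)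
      else if ws < windowSize then
        (st.1 ++ [0], ws)
      else
        (st.1 ++ [c], ws)) (([] : List Int), (0 : Int))).1

-- ===== PRECONDITION & SPEC =====
-- Pre_ requires windowSize ≥ 1 (or an empty list): for windowSize ≤ 0 on a nonempty list,
-- B's sliding window indexes Class[i - windowSize] past the end and raises IndexError, while
-- A either raises ZeroDivisionError (windowSize = 0) or returns values produced by empty slices.
def Pre_movingAvg (Class : List Int) (windowSize : Int) : Prop :=
  1 ≤ windowSize ∨ Class = []
instance (Class : List Int) (windowSize : Int) : Decidable (Pre_movingAvg Class windowSize) := by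
  unfold Pre_movingAvg; infer_instance

def pvWitness_movingAvg : List Int × Int := ([2, 2, 0, 2, 2, 0, 0], 3)

def Spec_movingAvg (Class : List Int) (windowSize : Int) (out : List Int) : Prop := out = movingAvg_alt Class windowSize
instance (Class : List Int) (windowSize : Int) (out : List Int) : Decidable (Spec_movingAvg Class windowSize out) := by
  unfold Spec_movingAvg; infer_instance

-- ===== CLAIM (what is proved, stated in full; the proofs are below) =====
def Claim_equal_movingAvg : Prop := ∀ (Class : List Int) (windowSize : Int), Dom_movingAvg Class windowSize → Pre_movingAvg Class windowSize → Spec_movingAvg Class windowSize (movingAvg Class windowSize)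

-- ===== LEMMAS AND PROOFS =====

-- the element A appends at index i (A's branch structure lifted out of the fold)
def elemA (Class : List Int) (windowSize : Int) (i : Int) : Int :=
  if i < windowSize - 1 then PySem.List.pyGetD Class i 0
  else if PySem.List.pyGetD Class i 0 ≠ PySem.List.pyGetD Class (i - 1) 0 then
    if (0 < windowSize ∧ (PySem.List.slice Class (some (i - (windowSize - 1))) (some (i + 1))).sum > windowSize)
        ∨ (windowSize < 0 ∧ (PySem.List.slice Class (some (i - (windowSize - 1))) (some (i + 1))).sum < windowSize) then 2
    else if (0 < windowSize ∧ (PySem.List.slice Class (some (i - (windowSize - 1))) (some (i + 1))).sum < windowSize)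
        ∨ (windowSize < 0 ∧ (PySem.List.slice Class (some (i - (windowSize - 1))) (some (i + 1))).sum > windowSize) then 0
    else PySem.List.pyGetD Class i 0
  else PySem.List.pyGetD Class i 0

lemma movingAvg_eq_map (Class : List Int) (windowSize : Int) :
    movingAvg Class windowSize
      = (PySem.List.pyRange 0 (Class.length : Int) 1).map (elemA Class windowSize) := by
  unfold movingAvg
  have hfun : (fun (filteredClass : List Int) (i : Int) =>
      if i < windowSize - 1 then filteredClass ++ [PySem.List.pyGetD Class i 0]
      else if PySem.List.pyGetD Class i 0 ≠ PySem.List.pyGetD Class (i - 1) 0 then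
        if (0 < windowSize ∧ (PySem.List.slice Class (some (i - (windowSize - 1))) (some (i + 1))).sum > windowSize)
            ∨ (windowSize < 0 ∧ (PySem.List.slice Class (some (i - (windowSize - 1))) (some (i + 1))).sum < windowSize) then
          filteredClass ++ [2]
        else if (0 < windowSize ∧ (PySem.List.slice Class (some (i - (windowSize - 1))) (some (i + 1))).sum < windowSize)
            ∨ (windowSize < 0 ∧ (PySem.List.slice Class (some (i - (windowSize - 1))) (some (i + 1))).sum > windowSize) then
          filteredClass ++ [0]
        else filteredClass ++ [PySem.List.pyGetD Class i 0]
      else filteredClass ++ [PySem.List.pyGetD Class i 0])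
      = fun acc i => acc ++ [elemA Class windowSize i] := by
    funext acc i
    unfold elemA
    split_ifs <;> rfl
  rw [hfun, PySem.List.foldl_append_singleton_eq_map, List.nil_append]

-- running window sum before processing index k (sum of the up-to-windowSize elements ending at k-1)
def preWS (Class : List Int) (windowSize : Int) (k : Nat) : Int :=
  (Class.take k).sum - (Class.take ((k : Int) - windowSize).toNat).sum

lemma preWS_zero (Class : List Int) (windowSize : Int) (hw : 1 ≤ windowSize) :
    preWS Class windowSize 0 = 0 := by
  have h : (-windowSize).toNat = 0 := by omega
  simp [preWS, h]

lemma preWS_step (Class : List Int) (windowSize : Int) (k : Nat)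
    (hk : k < Class.length) (hw : 1 ≤ windowSize) :
    preWS Class windowSize (k + 1)
      = preWS Class windowSize k + Class[k]
        - (if windowSize ≤ (k : Int) then PySem.List.pyGetD Class ((k : Int) - windowSize) 0 else 0) := by
  unfold preWS
  rw [List.sum_take_succ Class k hk]
  by_cases h : windowSize ≤ (k : Int)
  · have h1 : ((k + 1 : Nat) : Int) - windowSize = (((k - windowSize.toNat) + 1 : Nat) : Int) := by omega
    have h2 : ((k : Int) - windowSize).toNat = k - windowSize.toNat := by omega
    have hlt : k - windowSize.toNat < Class.length := by omega
    have h3 : ((k : Int) - windowSize) = (((k - windowSize.toNat : Nat)) : Int) := by omega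
    have hg : PySem.List.pyGetD Class ((k : Int) - windowSize) 0 = Class[k - windowSize.toNat] := by
      rw [h3, PySem.List.pyGetD_natCast]
      simp [hlt]
    rw [h1, h2]
    simp only [Int.toNat_natCast]
    rw [List.sum_take_succ Class (k - windowSize.toNat) hlt, if_pos h, hg]
    ring
  · have h1 : (((k + 1 : Nat) : Int) - windowSize).toNat = 0 := by omega
    have h2 : ((k : Int) - windowSize).toNat = 0 := by omega
    rw [h1, h2, if_neg h]
    simp

-- in the decision branch (k ≥ windowSize - 1) A's slice sum is exactly the running window sum
lemma slice_sum_eq_preWS (Class : List Int) (windowSize : Int) (k : Nat)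
    (hw : 1 ≤ windowSize) (hge : ¬ ((k : Int) < windowSize - 1)) :
    (PySem.List.slice Class (some ((k : Int) - (windowSize - 1))) (some ((k : Int) + 1))).sum
      = preWS Class windowSize (k + 1) := by
  have ha : (0 : Int) ≤ (k : Int) - (windowSize - 1) := by omega
  have hb : (0 : Int) ≤ (k : Int) + 1 := by omega
  rw [PySem.List.slice_toNat Class ha hb]
  unfold preWS
  set a := ((k : Int) - (windowSize - 1)).toNat with hadef
  have hA : (((k + 1 : Nat) : Int) - windowSize).toNat = a := by omega
  have hbt : ((k : Int) + 1).toNat = k + 1 := by omega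
  have hle : a ≤ k + 1 := by omega
  have hsplit : (Class.take (k + 1)).sum
      = (Class.take a).sum + (List.take (k + 1 - a) (List.drop a Class)).sum := by
    rw [← List.sum_append, ← List.take_add, Nat.add_sub_cancel' hle]
  rw [hbt, hA]
  omega

-- main fold invariant for B: processing the suffix from index k with the correct running sum
lemma B_fold_suffix (Class : List Int) (windowSize : Int) (hw : 1 ≤ windowSize) :
    ∀ (l : List Int) (k : Nat), l = Class.drop k →
    ∀ (acc : List Int),
      ((PySem.List.enumerate l (k : Int)).foldl (fun (st : List Int × Int) p =>
        let i := p.1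
        let c := p.2
        let ws0 := st.2 + c
        let ws := if windowSize ≤ i then ws0 - PySem.List.pyGetD Class (i - windowSize) 0 else ws0
        if i < windowSize - 1 ∨ c = PySem.List.pyGetD Class (i - 1) 0 then
          (st.1 ++ [c], ws)
        else if windowSize < ws then
          (st.1 ++ [2], ws)
        else if ws < windowSize then
          (st.1 ++ [0], ws)
        else
          (st.1 ++ [c], ws)) (acc, preWS Class windowSize k)).1
      = acc ++ (PySem.List.pyRange (k : Int) (Class.length : Int) 1).map (elemA Class windowSize) := by
  intro l
  induction l with
  | nil =>
    intro k hl acc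
    have hk : Class.length ≤ k := by
      have := congrArg List.length hl
      simp at this
      omega
    rw [PySem.List.pyRange_one_eq_nil (by exact_mod_cast hk)]
    simp [PySem.List.enumerate]
  | cons c t ih =>
    intro k hl acc
    have hk : k < Class.length := by
      by_contra h
      rw [List.drop_eq_nil_of_le (by omega)] at hl
      exact List.cons_ne_nil c t hl
    have hc : c = Class[k] := by
      have h0 : (Class.drop k)[0]? = some c := by rw [← hl]; rfl
      rw [List.getElem?_drop, Nat.add_zero, List.getElem?_eq_getElem hk] at h0
      exact (Option.some_injective _ h0).symm
    have ht : t = Class.drop (k + 1) := by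
      rw [← List.tail_drop, ← hl]
      rfl
    have hget : PySem.List.pyGetD Class (k : Int) 0 = c := by
      rw [PySem.List.pyGetD_natCast]
      simp [hk, hc]
    have hws : (if windowSize ≤ (k : Int) then
          preWS Class windowSize k + c - PySem.List.pyGetD Class ((k : Int) - windowSize) 0
        else preWS Class windowSize k + c) = preWS Class windowSize (k + 1) := by
      rw [preWS_step Class windowSize k hk hw, ← hc]
      by_cases h : windowSize ≤ (k : Int) <;> simp [h]
    rw [PySem.List.enumerate_cons]
    set f := (fun (st : List Int × Int) (p : Int × Int) =>
        let i := p.1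
        let c := p.2
        let ws0 := st.2 + c
        let ws := if windowSize ≤ i then ws0 - PySem.List.pyGetD Class (i - windowSize) 0 else ws0
        if i < windowSize - 1 ∨ c = PySem.List.pyGetD Class (i - 1) 0 then
          (st.1 ++ [c], ws)
        else if windowSize < ws then
          (st.1 ++ [2], ws)
        else if ws < windowSize then
          (st.1 ++ [0], ws)
        else
          (st.1 ++ [c], ws)) with hf
    have hstep : f (acc, preWS Class windowSize k) ((k : Int), c)
        = (acc ++ [elemA Class windowSize (k : Int)], preWS Class windowSize (k + 1)) := by
      rw [hf]
      dsimp only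
      rw [hws]
      unfold elemA
      by_cases h1 : (k : Int) < windowSize - 1
      · rw [if_pos (Or.inl h1), if_pos h1, hget]
      · by_cases h2 : c = PySem.List.pyGetD Class ((k : Int) - 1) 0
        · rw [if_pos (Or.inr h2), if_neg h1, if_neg (not_ne_iff.mpr (hget.trans h2)), hget]
        · have hne : PySem.List.pyGetD Class (k : Int) 0 ≠ PySem.List.pyGetD Class ((k : Int) - 1) 0 := by
            rw [hget]
            exact h2
          rw [if_neg (not_or.mpr ⟨h1, h2⟩), if_neg h1, if_pos hne,
             slice_sum_eq_preWS Class windowSize k hw h1]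
          have hpos : (0 : Int) < windowSize := by omega
          have hnneg : ¬ (windowSize < 0) := by omega
          by_cases h3 : windowSize < preWS Class windowSize (k + 1)
          · simp [h3, hpos, hnneg]
          · by_cases h4 : preWS Class windowSize (k + 1) < windowSize
            · simp [h3, h4, hpos, hnneg]
            · simp [h3, h4, hpos, hnneg, hget]
    rw [List.foldl_cons, hstep,
        PySem.List.pyRange_one_cons (show (k : Int) < (Class.length : Int) by exact_mod_cast hk),
        List.map_cons]
    have hih := ih (k + 1) ht (acc ++ [elemA Class windowSize (k : Int)])
    rw [hf] at hih
    push_cast at hih ⊢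
    rw [hih]
    simp

-- ===== VERDICT (by name: the statement is the Claim_ definition above) =====
theorem movingAvg_spec : Claim_equal_movingAvg := by
  intro Class windowSize _hdom hpre
  unfold Spec_movingAvg
  rcases hpre with hw | hnil
  · rw [movingAvg_eq_map]
    unfold movingAvg_alt
    have hfold := B_fold_suffix Class windowSize hw Class 0 (by simp) []
    rw [preWS_zero Class windowSize hw] at hfold
    push_cast at hfold
    rw [hfold]
    simp
  · subst hnil
    rfl
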